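-- pv_equiv track=rewrite | github.com/mohamedalhassan789/VOIGHT-Sec-Vuln-Agent | secvuln-agent/src/processors/matcher.py | _version_in_range
-- ===== SOURCE A (Python) =====
-- def _version_in_range(device_version: str, cve_version: str) -> bool:
--     """
--     Check if device version is affected by CVE version range.
--
--     Args:
--         device_version: Device version string
--         cve_version: CVE version string (may include ranges)
--
--     Returns:
--         bool: True if version is in affected range
--     """
--     # Simple version comparison
--     # This is a basic implementation - could be enhanced with version parsing libraries
--
--     # Handle version ranges like "< 2.0", ">= 1.5"
--     if any(op in cve_version for op in ['<', '>', '=']):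
--         return True  # Conservative: assume match if range specified
--
--     # Direct version comparison
--     try:
--         device_parts = [int(x) for x in device_version.split('.') if x.isdigit()]
--         cve_parts = [int(x) for x in cve_version.split('.') if x.isdigit()]
--
--         # Pad to same length
--         max_len = max(len(device_parts), len(cve_parts))
--         device_parts += [0] * (max_len - len(device_parts))
--         cve_parts += [0] * (max_len - len(cve_parts))
--
--         # Check if versions match closely
--         for i in range(max_len):
--             if device_parts[i] != cve_parts[i]:
--                 # Allow minor version differences
--                 if i > 0:  # Major version must match
--                     return True
--                 return False
--
--         return True
--
--     except (ValueError, AttributeError):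
--         # If version parsing fails, be conservative
--         return False
-- ===== SOURCE B (Python) =====
-- def _version_in_range(device_version: str, cve_version: str) -> bool:
--     # B: same guard, but the whole pad-and-loop comparison collapses to a single
--     # major-component comparison (first numeric token, 0 if none).
--     if any(op in cve_version for op in ['<', '>', '=']):
--         return True
--     device_major = next((int(x) for x in device_version.split('.') if x.isdigit()), 0)
--     cve_major = next((int(x) for x in cve_version.split('.') if x.isdigit()), 0)
--     return device_major == cve_major
-- ===== Notes on version B (the rewrite author's own statement) =====
-- stated objective: simpler
-- what changed: The pad-to-equal-length step and the index loop over all components are replaced by a closed form: the loop's value is exactly 'first numeric token equal' (0 when absent), so B compares only the major components and never pads or iterates.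
import Mathlib
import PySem

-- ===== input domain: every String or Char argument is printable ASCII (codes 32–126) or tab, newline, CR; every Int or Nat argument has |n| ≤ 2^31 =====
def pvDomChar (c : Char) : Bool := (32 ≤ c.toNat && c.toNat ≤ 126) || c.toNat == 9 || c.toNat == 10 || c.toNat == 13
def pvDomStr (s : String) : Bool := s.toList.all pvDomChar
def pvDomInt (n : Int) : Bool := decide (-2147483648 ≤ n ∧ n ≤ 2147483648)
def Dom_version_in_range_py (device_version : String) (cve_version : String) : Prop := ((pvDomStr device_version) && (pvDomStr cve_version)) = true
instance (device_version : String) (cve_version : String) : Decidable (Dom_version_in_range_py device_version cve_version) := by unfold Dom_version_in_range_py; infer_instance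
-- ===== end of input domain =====

-- B replaces A's zero-padding and component-by-component loop with a single
-- major-component comparison (objective: simpler).

-- ===== PORT A =====
-- s.split(".") with nonempty sep: split? is always `some`, getD [] exact. [int(x) for x in s.split('.') if x.isdigit()]; int(x) never raises on an
-- isdigit token, so ofStr? is always `some` here and getD 0 is exact.
def pvPartsA (s : String) : List Int :=
  (((PySem.Str.split? s ".").getD []).filter (fun x => PySem.Str.strIsdigit x)).map
    (fun x => (PySem.Int.ofStr? x).getD 0)

-- for i in range(max_len): if dp[i] != cp[i]: return i > 0; … return True
-- (indices produced by range are always in bounds, so pyGetD is exact)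
def pvCmpLoopA (dp cp : List Int) : List Int → Bool
  | [] => true
  | i :: is =>
      if PySem.List.pyGetD dp i 0 ≠ PySem.List.pyGetD cp i 0 then decide (i > 0)
      else pvCmpLoopA dp cp is

def version_in_range_py (device_version : String) (cve_version : String) : Bool :=
  if (["<", ">", "="] : List String).any (fun op => PySem.Str.isIn op cve_version) then
    true
  else
    -- try-block: the parse can never raise (all tokens pass isdigit), so the
    -- except branch returning False is unreachable and has no Lean counterpart
    let device_parts := pvPartsA device_version
    let cve_parts := pvPartsA cve_version
    let max_len := max device_parts.length cve_parts.length
    let device_parts := device_parts ++ List.replicate (max_len - device_parts.length) (0 : Int)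
    let cve_parts := cve_parts ++ List.replicate (max_len - cve_parts.length) (0 : Int)
    pvCmpLoopA device_parts cve_parts (PySem.List.pyRange 0 max_len 1)

-- ===== PORT B =====
-- next((int(x) for x in s.split('.') if x.isdigit()), 0)
def pvMajorB (s : String) : Int :=
  ((((PySem.Str.split? s ".").getD []).find? (fun x => PySem.Str.strIsdigit x)).map
    (fun x => (PySem.Int.ofStr? x).getD 0)).getD 0

def version_in_range_py_alt (device_version : String) (cve_version : String) : Bool :=
  if (["<", ">", "="] : List String).any (fun op => PySem.Str.isIn op cve_version) then
    true
  else
    pvMajorB device_version == pvMajorB cve_version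

-- ===== PRECONDITION & SPEC =====
def Spec_version_in_range_py (device_version : String) (cve_version : String) (out : Bool) : Prop := out = version_in_range_py_alt device_version cve_version
instance (device_version : String) (cve_version : String) (out : Bool) : Decidable (Spec_version_in_range_py device_version cve_version out) := by unfold Spec_version_in_range_py; infer_instance

-- ===== CLAIM (what is proved, stated in full; the proofs are below) =====
def Claim_equal_version_in_range_py : Prop := ∀ (device_version : String) (cve_version : String), Dom_version_in_range_py device_version cve_version → Spec_version_in_range_py device_version cve_version (version_in_range_py device_version cve_version)

-- ===== LEMMAS AND PROOFS =====

-- the loop returns true on any index list of strictly positive indices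
theorem pvCmpLoopA_pos (dp cp : List Int) (is : List Int)
    (h : ∀ i ∈ is, 0 < i) : pvCmpLoopA dp cp is = true := by
  induction is with
  | nil => rfl
  | cons i is ih =>
      simp only [pvCmpLoopA]
      split
      · simpa using h i (by simp)
      · exact ih (fun j hj => h j (by simp [hj]))

-- padded head at index 0 is the unpadded headD 0
theorem pvPaddedHead (xs : List Int) (n : Nat) (hn : 0 < n) (hx : xs.length ≤ n) :
    PySem.List.pyGetD (xs ++ List.replicate (n - xs.length) (0 : Int)) 0 0 = xs.headD 0 := by
  rw [PySem.List.pyGetD_zero]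
  cases xs with
  | nil =>
      cases n with
      | zero => omega
      | succ m => simp [List.replicate_succ]
  | cons a t => simp

-- the whole pad-and-loop computation is a single head comparison
theorem pvLoopEqHead (dp cp : List Int) (n : Nat) (hn : n = max dp.length cp.length) :
    pvCmpLoopA (dp ++ List.replicate (n - dp.length) (0 : Int))
               (cp ++ List.replicate (n - cp.length) (0 : Int))
               (PySem.List.pyRange 0 n 1)
      = (dp.headD 0 == cp.headD 0) := by
  by_cases h0 : n = 0
  · have hd : dp = [] := by
      cases dp with | nil => rfl | cons a t => simp [hn] at h0
    have hc : cp = [] := by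
      cases cp with | nil => rfl | cons a t => simp [hn] at h0
    subst hd; subst hc
    simp [h0, PySem.List.pyRange_one_eq_nil, pvCmpLoopA]
  · have hpos : (0 : Int) < (n : Int) := by omega
    rw [PySem.List.pyRange_one_cons hpos]
    simp only [pvCmpLoopA]
    rw [pvPaddedHead dp n (by omega) (by omega),
        pvPaddedHead cp n (by omega) (by omega)]
    split
    · rename_i hne
      simp only [List.headD_eq_head?_getD] at hne
      simp [hne]
    · rename_i heq
      rw [not_not] at heq
      simp only [List.headD_eq_head?_getD] at heq
      rw [pvCmpLoopA_pos]
      · simp [heq]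
      · intro i hi
        have := (PySem.List.mem_pyRange_one).mp hi
        omega

-- B's major component is the headD 0 of A's parts list
theorem pvMajor_eq_headD (s : String) : pvMajorB s = (pvPartsA s).headD 0 := by
  unfold pvMajorB pvPartsA
  rw [← List.head?_filter]
  cases h : (((PySem.Str.split? s ".").getD []).filter (fun x => PySem.Str.strIsdigit x)) with
  | nil => simp
  | cons a t => simp

-- ===== VERDICT (by name: the statement is the Claim_ definition above) =====
theorem version_in_range_py_spec : Claim_equal_version_in_range_py := by
  intro device_version cve_version _
  unfold Spec_version_in_range_py version_in_range_py version_in_range_py_alt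
  split
  · rfl
  · rw [pvMajor_eq_headD, pvMajor_eq_headD]
    exact pvLoopEqHead (pvPartsA device_version) (pvPartsA cve_version) _ rfl
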